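-- pv_equiv track=rewrite | github.com/RafeedIqbal/id8 | backend/app/orchestrator/handlers/write_code.py | _build_python_module_index
-- ===== SOURCE A (Python) =====
-- def _build_python_module_index(file_paths: set[str]) -> set[str]:
--     modules: set[str] = set()
--     for path in file_paths:
--         if not path.endswith(".py"):
--             continue
--         without_ext = path[:-3]
--         parts = without_ext.split("/")
--         for idx in range(len(parts)):
--             suffix = parts[idx:]
--             if suffix and suffix[-1] == "__init__":
--                 suffix = suffix[:-1]
--             if suffix:
--                 modules.add(".".join(suffix))
--     return modules
-- ===== SOURCE B (Python) =====
-- def _build_python_module_index(file_paths: set[str]) -> set[str]: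
--     modules: set[str] = set()
--     for path in file_paths:
--         if not path.endswith(".py"):
--             continue
--         comps = path[:-3].split("/")
--         if comps[-1] == "__init__":
--             comps = comps[:-1]
--         sufs: list[str] = []
--         for comp in reversed(comps):
--             sufs.append(comp + "." + sufs[-1] if sufs else comp)
--         for dotted in reversed(sufs):
--             modules.add(dotted)
--     return modules
-- ===== Notes on version B (the rewrite author's own statement) =====
-- stated objective: alternative
-- what changed: B hoists the trailing-__init__ check out of the per-index loop (it only ever fires on the path's last component) and builds each dotted suffix incrementally in one right-to-left accumulator pass, instead of re-slicing parts[idx:] and re-joining it for every index.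
import Mathlib
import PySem

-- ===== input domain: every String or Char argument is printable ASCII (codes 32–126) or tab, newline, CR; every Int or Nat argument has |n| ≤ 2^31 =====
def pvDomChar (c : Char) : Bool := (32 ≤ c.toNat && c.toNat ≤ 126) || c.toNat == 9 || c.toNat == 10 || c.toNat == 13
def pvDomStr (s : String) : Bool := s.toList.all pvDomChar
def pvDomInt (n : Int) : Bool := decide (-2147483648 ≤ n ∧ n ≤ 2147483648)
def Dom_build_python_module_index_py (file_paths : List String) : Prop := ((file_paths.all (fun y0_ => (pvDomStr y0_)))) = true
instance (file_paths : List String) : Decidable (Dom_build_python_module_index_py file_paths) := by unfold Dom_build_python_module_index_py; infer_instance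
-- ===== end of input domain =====

-- ===== PORT A =====
-- One honest line: B hoists the trailing-__init__ check out of the per-index loop and builds each
-- dotted suffix incrementally in one right-to-left accumulator pass (objective: alternative decomposition).
def build_python_module_index_py (file_paths : List String) : List String :=
  file_paths.foldl (fun modules path =>
    if PySem.Str.endswith path ".py" then
      let without_ext := PySem.Str.slice path none (some (-3))
      let parts := (PySem.Str.split? without_ext "/").getD []
      (PySem.List.pyRange 0 parts.length 1).foldl (fun modules idx =>
        let suffix := PySem.List.slice parts (some idx) none
        let suffix := if suffix ≠ [] ∧ PySem.List.pyGet? suffix (-1) = some "__init__"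
          then PySem.List.slice suffix none (some (-1)) else suffix
        if suffix ≠ [] then PySem.Set.add modules (PySem.Str.join "." suffix) else modules)
        modules
    else modules) PySem.Set.empty

-- ===== PORT B =====
def build_python_module_index_py_alt (file_paths : List String) : List String :=
  file_paths.foldl (fun modules path =>
    if PySem.Str.endswith path ".py" then
      let comps0 := (PySem.Str.split? (PySem.Str.slice path none (some (-3))) "/").getD []
      let comps := if PySem.List.pyGet? comps0 (-1) = some "__init__"
        then PySem.List.slice comps0 none (some (-1)) else comps0
      let sufs := comps.reverse.foldl (fun sufs comp =>
        sufs ++ [if sufs.isEmpty then comp else comp ++ "." ++ PySem.List.pyGetD sufs (-1) ""]) []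
      sufs.reverse.foldl (fun modules dotted => PySem.Set.add modules dotted) modules
    else modules) PySem.Set.empty

-- ===== PRECONDITION & SPEC =====
def Spec_build_python_module_index_py (file_paths : List String) (out : List String) : Prop := out = build_python_module_index_py_alt file_paths
instance (file_paths : List String) (out : List String) : Decidable (Spec_build_python_module_index_py file_paths out) := by unfold Spec_build_python_module_index_py; infer_instance

-- ===== CLAIM (what is proved, stated in full; the proofs are below) =====
def Claim_equal_build_python_module_index_py : Prop := ∀ (file_paths : List String), Dom_build_python_module_index_py file_paths → Spec_build_python_module_index_py file_paths (build_python_module_index_py file_paths)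

-- ===== LEMMAS AND PROOFS =====

-- the list of dotted suffixes of a component list, longest first
def pvSuffixes (cs : List String) : List String :=
  (List.range cs.length).map (fun k => PySem.Str.join "." (cs.drop k))

theorem pvJoin_singleton (a : String) : PySem.Str.join "." [a] = a := by
  rw [← String.toList_inj]
  simp [PySem.Str.toList_join, PySem.Chars.join, List.intercalate]

theorem pvJoin_cons_cons (a b : String) (t : List String) :
    PySem.Str.join "." (a :: b :: t) = a ++ "." ++ PySem.Str.join "." (b :: t) := by
  rw [← String.toList_inj]
  simp [PySem.Str.toList_join, PySem.Chars.join_cons_cons]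

theorem pvSuffixes_cons (c : String) (cs : List String) :
    pvSuffixes (c :: cs) = PySem.Str.join "." (c :: cs) :: pvSuffixes cs := by
  simp [pvSuffixes, List.range_succ_eq_map, List.map_map, Function.comp_def]

-- B's right-to-left accumulator produces exactly the suffix list, shortest first
theorem pvSufs_eq (cs : List String) :
    cs.reverse.foldl (fun sufs comp =>
        sufs ++ [if sufs.isEmpty then comp else comp ++ "." ++ PySem.List.pyGetD sufs (-1) ""]) [] =
      (pvSuffixes cs).reverse := by
  induction cs with
  | nil => rfl
  | cons c cs ih =>
    rw [List.reverse_cons, List.foldl_append, ih, pvSuffixes_cons, List.reverse_cons]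
    cases cs with
    | nil => simp [pvSuffixes, pvJoin_singleton]
    | cons d t =>
      simp [pvSuffixes_cons, pvJoin_cons_cons, PySem.List.pyGetD_neg_one_append_singleton]

-- B's per-path block over a fixed component list cs equals the left-to-right add of pvSuffixes cs
theorem pvB_core (cs modules : List String) :
    (cs.reverse.foldl (fun sufs comp =>
        sufs ++ [if sufs.isEmpty then comp else comp ++ "." ++ PySem.List.pyGetD sufs (-1) ""]) []).reverse.foldl
      (fun modules dotted => PySem.Set.add modules dotted) modules =
    (List.range cs.length).foldl (fun m k => PySem.Set.add m (PySem.Str.join "." (cs.drop k))) modules := by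
  rw [pvSufs_eq, List.reverse_reverse, pvSuffixes, List.foldl_map]

-- A's inner loop, with pyRange/slice reduced to List.range/drop
theorem pvA_range (parts modules : List String) :
    (PySem.List.pyRange 0 parts.length 1).foldl (fun modules idx =>
        let suffix := PySem.List.slice parts (some idx) none
        let suffix := if suffix ≠ [] ∧ PySem.List.pyGet? suffix (-1) = some "__init__"
          then PySem.List.slice suffix none (some (-1)) else suffix
        if suffix ≠ [] then PySem.Set.add modules (PySem.Str.join "." suffix) else modules)
      modules =
    (List.range parts.length).foldl (fun m k =>
        let suffix := parts.drop k
        let suffix := if suffix ≠ [] ∧ suffix.getLast? = some "__init__" then suffix.dropLast else suffix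
        if suffix ≠ [] then PySem.Set.add m (PySem.Str.join "." suffix) else m)
      modules := by
  rw [PySem.List.pyRange_zero_nat, List.foldl_map]
  refine PySem.List.foldl_congr_mem _ _ _ _ (fun acc k _ => ?_)
  simp only [PySem.List.slice_from_natCast, PySem.List.pyGet?_neg_one, PySem.List.slice_to_neg_one]

-- A's inner loop when the path ends in /__init__: the last index contributes nothing
theorem pvA_init (cs modules : List String) :
    (List.range (cs ++ ["__init__"]).length).foldl (fun m k =>
        let suffix := (cs ++ ["__init__"]).drop k
        let suffix := if suffix ≠ [] ∧ suffix.getLast? = some "__init__" then suffix.dropLast else suffix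
        if suffix ≠ [] then PySem.Set.add m (PySem.Str.join "." suffix) else m) modules =
    (List.range cs.length).foldl (fun m k => PySem.Set.add m (PySem.Str.join "." (cs.drop k))) modules := by
  rw [List.length_append, List.length_cons, List.length_nil, List.range_succ, List.foldl_append,
    List.foldl_cons, List.foldl_nil]
  have hmain : (List.range cs.length).foldl (fun m k =>
        let suffix := (cs ++ ["__init__"]).drop k
        let suffix := if suffix ≠ [] ∧ suffix.getLast? = some "__init__" then suffix.dropLast else suffix
        if suffix ≠ [] then PySem.Set.add m (PySem.Str.join "." suffix) else m) modules =
      (List.range cs.length).foldl (fun m k => PySem.Set.add m (PySem.Str.join "." (cs.drop k))) modules := by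
    refine PySem.List.foldl_congr_mem _ _ _ _ (fun acc k hk => ?_)
    have hk' : k ≤ cs.length := le_of_lt (List.mem_range.mp hk)
    have hd : (cs ++ ["__init__"]).drop k = cs.drop k ++ ["__init__"] := by
      rw [List.drop_append_of_le_length hk']
    have hne : cs.drop k ≠ [] := by
      intro h; exact absurd (List.drop_eq_nil_iff.mp h) (not_le.mpr (List.mem_range.mp hk))
    simp [hd, hne]
  rw [hmain]
  simp

-- equality of the two per-path inner blocks, for any parts
theorem pvInner_eq (parts modules : List String) :
    (PySem.List.pyRange 0 parts.length 1).foldl (fun modules idx =>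
        let suffix := PySem.List.slice parts (some idx) none
        let suffix := if suffix ≠ [] ∧ PySem.List.pyGet? suffix (-1) = some "__init__"
          then PySem.List.slice suffix none (some (-1)) else suffix
        if suffix ≠ [] then PySem.Set.add modules (PySem.Str.join "." suffix) else modules)
      modules =
    (let comps := if PySem.List.pyGet? parts (-1) = some "__init__"
        then PySem.List.slice parts none (some (-1)) else parts
     let sufs := comps.reverse.foldl (fun sufs comp =>
        sufs ++ [if sufs.isEmpty then comp else comp ++ "." ++ PySem.List.pyGetD sufs (-1) ""]) []
     sufs.reverse.foldl (fun modules dotted => PySem.Set.add modules dotted) modules) := by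
  rw [pvA_range]
  simp only [PySem.List.pyGet?_neg_one, PySem.List.slice_to_neg_one]
  cases hl : parts.getLast? with
  | none =>
    rw [List.getLast?_eq_none_iff.mp hl]
    simp
  | some l =>
    by_cases hinit : l = "__init__"
    · subst hinit
      obtain ⟨cs, rfl⟩ := List.getLast?_eq_some_iff.mp hl
      rw [if_pos rfl, List.dropLast_concat, pvB_core]
      exact pvA_init cs modules
    · rw [if_neg (show ¬ some l = some "__init__" by simp [hinit]), pvB_core]
      refine PySem.List.foldl_congr_mem _ _ _ _ (fun acc k hk => ?_)
      have hk' : k < parts.length := List.mem_range.mp hk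
      have hne : parts.drop k ≠ [] := by
        intro h; exact absurd (List.drop_eq_nil_iff.mp h) (not_le.mpr hk')
      have hlast' : (parts.drop k).getLast? = some l := by
        rw [List.getLast?_drop, if_neg (not_le.mpr hk'), hl]
      simp [hne, hlast', hinit]

-- ===== VERDICT (by name: the statement is the Claim_ definition above) =====
theorem build_python_module_index_py_spec : Claim_equal_build_python_module_index_py := by
  intro file_paths _
  unfold Spec_build_python_module_index_py build_python_module_index_py build_python_module_index_py_alt
  refine PySem.List.foldl_congr_mem _ _ _ _ (fun modules path _ => ?_)
  by_cases h : PySem.Str.endswith path ".py" = true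
  · rw [if_pos h, if_pos h]
    exact pvInner_eq _ modules
  · rw [if_neg h, if_neg h]
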